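-- pv_equiv track=rewrite | github.com/emcconne/guitarsaregreat | GuitarsAreGreat/GCScan/__init__.py | set_price_range_url_option
-- ===== SOURCE A (Python) =====
-- price_range=[25,50,100,200,300,500,750,1000,1500,2000,3000,5000,7500,15000,50000]
--
-- def set_price_range_url_option(low_price, high_price):
--     # These values are defined in the min/max boxes for prices on GC website
--     price_url_string=""
--     if low_price==0 and high_price==0:
--         return price_url_string
--     if low_price:
--         low_position_in_range=find_lower_number(price_range,low_price)
--     if high_price:
--         high_position_in_range=find_higher_number(price_range,high_price)
--     if not high_price:
--         high_position_in_range=15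
--     if not low_price:
--         low_position_in_range=1
--     # range below has +1 added since python stops at top of range and doesn't include it by default
--     for num in range(low_position_in_range, high_position_in_range+1):
--         price_url_string += str(1080+num) + "+"
--     return "&N=" + price_url_string.rstrip("+")
--
-- def find_higher_number(arr, num):
--     for i in range(len(arr)):
--         if arr[i] >= num:
--             # return position without including 0
--             return i+1
--     return -1
--
-- def find_lower_number(arr, num):
--     for i in range(len(arr)):
--         if arr[i] <= num:
--             continue
--         else:
--             # return position without including 0
--             return i+1
--     return -1
-- ===== SOURCE B (Python) =====
-- import bisect
--
-- price_range=[25,50,100,200,300,500,750,1000,1500,2000,3000,5000,7500,15000,50000]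
--
-- def set_price_range_url_option(low_price, high_price):
--     if low_price==0 and high_price==0:
--         return ""
--     if low_price:
--         i = bisect.bisect_right(price_range, low_price)
--         low_position = i+1 if i < len(price_range) else -1
--     else:
--         low_position = 1
--     if high_price:
--         j = bisect.bisect_left(price_range, high_price)
--         high_position = j+1 if j < len(price_range) else -1
--     else:
--         high_position = 15
--     return "&N=" + "+".join(str(1080+n) for n in range(low_position, high_position+1))
-- ===== Notes on version B (the rewrite author's own statement) =====
-- stated objective: alternative
-- what changed: The two linear scans over the price table are replaced by bisect binary searches (bisect_right/bisect_left with an explicit -1 when the bound exceeds every entry), and the append-then-rstrip('+') string loop is replaced by a '+'.join over the same range.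
import Mathlib
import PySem

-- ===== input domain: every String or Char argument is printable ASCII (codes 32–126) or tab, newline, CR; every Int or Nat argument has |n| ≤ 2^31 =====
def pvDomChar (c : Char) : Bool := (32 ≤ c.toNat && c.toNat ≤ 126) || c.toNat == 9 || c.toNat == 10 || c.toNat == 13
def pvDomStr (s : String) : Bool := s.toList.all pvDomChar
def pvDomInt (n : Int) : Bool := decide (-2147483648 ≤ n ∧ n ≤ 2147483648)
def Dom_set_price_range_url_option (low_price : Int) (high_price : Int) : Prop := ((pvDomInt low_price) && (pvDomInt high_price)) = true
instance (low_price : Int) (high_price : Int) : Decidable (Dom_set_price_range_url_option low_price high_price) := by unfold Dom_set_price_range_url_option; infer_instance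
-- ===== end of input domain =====

-- B replaces A's two linear scans by binary searches and A's append-then-rstrip loop by a '+'.join; same return value everywhere.

-- ===== PORT A =====
def price_range : List Int := [25,50,100,200,300,500,750,1000,1500,2000,3000,5000,7500,15000,50000]

-- for i in range(len(arr)): if arr[i] >= num: return i+1; return -1
def find_higher_number_go : List Int → Int → Int → Int
  | [], _, _ => -1
  | a :: rest, num, i => if a ≥ num then i + 1 else find_higher_number_go rest num (i + 1)

def find_higher_number (arr : List Int) (num : Int) : Int := find_higher_number_go arr num 0

-- for i in range(len(arr)): if arr[i] <= num: continue else: return i+1; return -1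
def find_lower_number_go : List Int → Int → Int → Int
  | [], _, _ => -1
  | a :: rest, num, i => if a ≤ num then find_lower_number_go rest num (i + 1) else i + 1

def find_lower_number (arr : List Int) (num : Int) : Int := find_lower_number_go arr num 0

-- exact: Python str.rstrip("+") — drop trailing '+' characters
def rstripPlus (cs : List Char) : List Char := (cs.reverse.dropWhile (· == '+')).reverse

-- A's tail: the accumulation loop over range(low, high+1), rstrip("+"), prefixed by "&N="
def build_url_a (low_position high_position : Int) : String :=
  String.ofList (['&','N','='] ++
    rstripPlus ((PySem.List.pyRange low_position (high_position + 1) 1).foldl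
      (fun acc num => acc ++ PySem.Int.toChars (1080 + num) ++ ['+']) []))

def set_price_range_url_option (low_price : Int) (high_price : Int) : String :=
  if low_price = 0 ∧ high_price = 0 then ""
  else
    let low_position := if low_price ≠ 0 then find_lower_number price_range low_price else 1
    let high_position := if high_price ≠ 0 then find_higher_number price_range high_price else 15
    build_url_a low_position high_position

-- ===== PORT B =====
-- bisect.bisect_right over the fixed price_range (fuel 16 ≥ interval width; loop: while lo < hi)
def bisect_right_go : Nat → Nat → Nat → Int → Nat
  | 0, lo, _, _ => lo
  | fuel + 1, lo, hi, x =>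
    if lo < hi then
      if x < price_range.getD ((lo + hi) / 2) 0 then bisect_right_go fuel lo ((lo + hi) / 2) x
      else bisect_right_go fuel ((lo + hi) / 2 + 1) hi x
    else lo

def bisect_right (x : Int) : Nat := bisect_right_go 16 0 15 x

-- bisect.bisect_left over the fixed price_range
def bisect_left_go : Nat → Nat → Nat → Int → Nat
  | 0, lo, _, _ => lo
  | fuel + 1, lo, hi, x =>
    if lo < hi then
      if price_range.getD ((lo + hi) / 2) 0 < x then bisect_left_go fuel ((lo + hi) / 2 + 1) hi x
      else bisect_left_go fuel lo ((lo + hi) / 2) x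
    else lo

def bisect_left (x : Int) : Nat := bisect_left_go 16 0 15 x

-- B's tail: "&N=" + "+".join(str(1080+n) for n in range(low, high+1))
def build_url_b (low_position high_position : Int) : String :=
  String.ofList (['&','N','='] ++
    PySem.Chars.join ['+']
      ((PySem.List.pyRange low_position (high_position + 1) 1).map (fun n => PySem.Int.toChars (1080 + n))))

def set_price_range_url_option_alt (low_price : Int) (high_price : Int) : String :=
  if low_price = 0 ∧ high_price = 0 then ""
  else
    let low_position :=
      if low_price ≠ 0 then
        if ((bisect_right low_price : Int)) < (price_range.length : Int) then (bisect_right low_price : Int) + 1 else -1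
      else 1
    let high_position :=
      if high_price ≠ 0 then
        if ((bisect_left high_price : Int)) < (price_range.length : Int) then (bisect_left high_price : Int) + 1 else -1
      else 15
    build_url_b low_position high_position

-- ===== PRECONDITION & SPEC =====
def Spec_set_price_range_url_option (low_price : Int) (high_price : Int) (out : String) : Prop := out = set_price_range_url_option_alt low_price high_price
instance (low_price : Int) (high_price : Int) (out : String) : Decidable (Spec_set_price_range_url_option low_price high_price out) := by unfold Spec_set_price_range_url_option; infer_instance

-- ===== CLAIM (what is proved, stated in full; the proofs are below) =====
def Claim_equal_set_price_range_url_option : Prop := ∀ (low_price : Int) (high_price : Int), Dom_set_price_range_url_option low_price high_price → Spec_set_price_range_url_option low_price high_price (set_price_range_url_option low_price high_price)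

-- ===== LEMMAS AND PROOFS =====

-- the positions either side can feed into the string builder
def posSet : List Int := [-1,1,2,3,4,5,6,7,8,9,10,11,12,13,14,15]

-- price_range is sorted, stated on getD
theorem price_range_mono (i j : Nat) (hij : i ≤ j) (hj : j < price_range.length) :
    price_range.getD i 0 ≤ price_range.getD j 0 := by
  rcases Nat.lt_or_ge i j with h | h
  · have hp : price_range.Pairwise (· ≤ ·) := by decide
    have hi : i < price_range.length := by omega
    rw [List.getD_eq_getElem _ _ hi, List.getD_eq_getElem _ _ hj]
    exact List.pairwise_iff_getElem.mp hp i j hi hj h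
  · have : i = j := by omega
    simp [this]

-- a predicate true on exactly the first lo positions of l has countP = lo
theorem countP_split (p : Int → Bool) : ∀ (l : List Int) (lo : Nat), lo ≤ l.length →
    (∀ k, k < lo → p (l.getD k 0) = true) →
    (∀ k, lo ≤ k → k < l.length → p (l.getD k 0) = false) →
    l.countP p = lo := by
  intro l
  induction l with
  | nil => intro lo h _ _; simp at h; simp [h]
  | cons a t ih =>
    intro lo hlo h1 h2
    cases lo with
    | zero =>
      have ha : p a = false := by simpa using h2 0 (by omega) (by simp)
      have ht : t.countP p = 0 := by
        apply ih 0 (by omega) (by intro k hk; omega)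
        intro k _ hk
        simpa [List.getD_cons_succ] using h2 (k + 1) (by omega) (by simp; omega)
      simp [ha, ht]
    | succ n =>
      have ha : p a = true := by simpa using h1 0 (by omega)
      have ht : t.countP p = n := by
        apply ih n (by simpa using hlo)
        · intro k hk; simpa [List.getD_cons_succ] using h1 (k + 1) (by omega)
        · intro k hk hk2; simpa [List.getD_cons_succ] using h2 (k + 1) (by omega) (by simp; omega)
      simp [ha, ht]

-- bisect_right computes the number of elements ≤ x
theorem bisect_right_go_inv : ∀ (fuel lo hi : Nat) (x : Int), lo ≤ hi → hi ≤ 15 → hi - lo ≤ fuel →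
    (∀ k, k < lo → price_range.getD k 0 ≤ x) →
    (∀ k, hi ≤ k → k < 15 → x < price_range.getD k 0) →
    bisect_right_go fuel lo hi x = price_range.countP (fun a => decide (a ≤ x)) := by
  intro fuel
  induction fuel with
  | zero =>
    intro lo hi x h1 h2 h3 inv1 inv2
    have hlh : lo = hi := by omega
    subst hlh
    simp only [bisect_right_go]
    refine (countP_split _ price_range lo (by simp [price_range]; omega) ?_ ?_).symm
    · intro k hk; simpa using inv1 k hk
    · intro k hk hk2
      simp only [decide_eq_false_iff_not, not_le]
      exact inv2 k hk (by simpa [price_range] using hk2)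
  | succ fuel ih =>
    intro lo hi x h1 h2 h3 inv1 inv2
    simp only [bisect_right_go]
    by_cases hlh : lo < hi
    · simp only [if_pos hlh]
      by_cases ht : x < price_range.getD ((lo + hi) / 2) 0
      · simp only [if_pos ht]
        apply ih lo ((lo + hi) / 2) x (by omega) (by omega) (by omega) inv1
        intro k hk hk15
        exact lt_of_lt_of_le ht (price_range_mono _ _ hk (by simp [price_range]; omega))
      · simp only [if_neg ht]
        apply ih ((lo + hi) / 2 + 1) hi x (by omega) h2 (by omega)
        · intro k hk
          exact le_trans (price_range_mono k ((lo + hi) / 2) (by omega) (by simp [price_range]; omega)) (by omega)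
        · exact inv2
    · simp only [if_neg hlh]
      have hlh' : lo = hi := by omega
      subst hlh'
      refine (countP_split _ price_range lo (by simp [price_range]; omega) ?_ ?_).symm
      · intro k hk; simpa using inv1 k hk
      · intro k hk hk2
        simp only [decide_eq_false_iff_not, not_le]
        exact inv2 k hk (by simpa [price_range] using hk2)

theorem bisect_right_eq (x : Int) : bisect_right x = price_range.countP (fun a => decide (a ≤ x)) := by
  apply bisect_right_go_inv 16 0 15 x (by omega) (by omega) (by omega)
  · intro k hk; omega
  · intro k hk hk2; omega

-- bisect_left computes the number of elements < x
theorem bisect_left_go_inv : ∀ (fuel lo hi : Nat) (x : Int), lo ≤ hi → hi ≤ 15 → hi - lo ≤ fuel →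
    (∀ k, k < lo → price_range.getD k 0 < x) →
    (∀ k, hi ≤ k → k < 15 → x ≤ price_range.getD k 0) →
    bisect_left_go fuel lo hi x = price_range.countP (fun a => decide (a < x)) := by
  intro fuel
  induction fuel with
  | zero =>
    intro lo hi x h1 h2 h3 inv1 inv2
    have hlh : lo = hi := by omega
    subst hlh
    simp only [bisect_left_go]
    refine (countP_split _ price_range lo (by simp [price_range]; omega) ?_ ?_).symm
    · intro k hk; simpa using inv1 k hk
    · intro k hk hk2
      simp only [decide_eq_false_iff_not, not_lt]
      exact inv2 k hk (by simpa [price_range] using hk2)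
  | succ fuel ih =>
    intro lo hi x h1 h2 h3 inv1 inv2
    simp only [bisect_left_go]
    by_cases hlh : lo < hi
    · simp only [if_pos hlh]
      by_cases ht : price_range.getD ((lo + hi) / 2) 0 < x
      · simp only [if_pos ht]
        apply ih ((lo + hi) / 2 + 1) hi x (by omega) h2 (by omega)
        · intro k hk
          exact lt_of_le_of_lt (price_range_mono k ((lo + hi) / 2) (by omega) (by simp [price_range]; omega)) ht
        · exact inv2
      · simp only [if_neg ht]
        apply ih lo ((lo + hi) / 2) x (by omega) (by omega) (by omega) inv1
        intro k hk hk15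
        exact le_trans (by omega) (price_range_mono _ _ hk (by simp [price_range]; omega))
    · simp only [if_neg hlh]
      have hlh' : lo = hi := by omega
      subst hlh'
      refine (countP_split _ price_range lo (by simp [price_range]; omega) ?_ ?_).symm
      · intro k hk; simpa using inv1 k hk
      · intro k hk hk2
        simp only [decide_eq_false_iff_not, not_lt]
        exact inv2 k hk (by simpa [price_range] using hk2)

theorem bisect_left_eq (x : Int) : bisect_left x = price_range.countP (fun a => decide (a < x)) := by
  apply bisect_left_go_inv 16 0 15 x (by omega) (by omega) (by omega)
  · intro k hk; omega
  · intro k hk hk2; omega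

-- A's lower scan on a sorted list, expressed through countP
theorem find_lower_go_eq (num : Int) : ∀ (l : List Int), l.Pairwise (· ≤ ·) → ∀ (i : Int),
    find_lower_number_go l num i =
      (if ((l.countP (fun a => decide (a ≤ num)) : Int)) < (l.length : Int)
       then i + (l.countP (fun a => decide (a ≤ num)) : Int) + 1 else -1) := by
  intro l
  induction l with
  | nil => intro _ i; simp [find_lower_number_go]
  | cons a t ih =>
    intro hp i
    have ha := (List.pairwise_cons.mp hp).1
    have ht := (List.pairwise_cons.mp hp).2
    simp only [find_lower_number_go]
    by_cases h : a ≤ num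
    · rw [if_pos h, ih ht (i + 1)]
      have hc : (a :: t).countP (fun a => decide (a ≤ num)) = t.countP (fun a => decide (a ≤ num)) + 1 := by
        simp [h]
      rw [hc]
      simp only [List.length_cons]
      split_ifs <;> push_cast at * <;> omega
    · rw [if_neg h]
      have hc : (a :: t).countP (fun a => decide (a ≤ num)) = 0 := by
        apply List.countP_eq_zero.mpr
        intro b hb
        simp only [List.mem_cons] at hb
        rcases hb with rfl | hb
        · simpa using h
        · have := ha b hb; simp; omega
      rw [hc]
      simp only [List.length_cons]
      split_ifs <;> push_cast at * <;> omega

-- A's higher scan on a sorted list, expressed through countP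
theorem find_higher_go_eq (num : Int) : ∀ (l : List Int), l.Pairwise (· ≤ ·) → ∀ (i : Int),
    find_higher_number_go l num i =
      (if ((l.countP (fun a => decide (a < num)) : Int)) < (l.length : Int)
       then i + (l.countP (fun a => decide (a < num)) : Int) + 1 else -1) := by
  intro l
  induction l with
  | nil => intro _ i; simp [find_higher_number_go]
  | cons a t ih =>
    intro hp i
    have ha := (List.pairwise_cons.mp hp).1
    have ht := (List.pairwise_cons.mp hp).2
    simp only [find_higher_number_go]
    by_cases h : a ≥ num
    · rw [if_pos h]
      have hc : (a :: t).countP (fun a => decide (a < num)) = 0 := by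
        apply List.countP_eq_zero.mpr
        intro b hb
        simp only [List.mem_cons] at hb
        rcases hb with rfl | hb
        · simp; omega
        · have := ha b hb; simp; omega
      rw [hc]
      simp only [List.length_cons]
      split_ifs <;> push_cast at * <;> omega
    · rw [if_neg h, ih ht (i + 1)]
      have hc : (a :: t).countP (fun a => decide (a < num)) = t.countP (fun a => decide (a < num)) + 1 := by
        simp only [List.countP_cons]
        have : a < num := by omega
        simp [this]
      rw [hc]
      simp only [List.length_cons]
      split_ifs <;> push_cast at * <;> omega

-- the two position computations agree
theorem low_pos_eq (num : Int) :
    find_lower_number price_range num =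
      (if ((bisect_right num : Int)) < (price_range.length : Int) then (bisect_right num : Int) + 1 else -1) := by
  rw [find_lower_number, find_lower_go_eq num price_range (by decide) 0, bisect_right_eq]
  split_ifs <;> omega

theorem high_pos_eq (num : Int) :
    find_higher_number price_range num =
      (if ((bisect_left num : Int)) < (price_range.length : Int) then (bisect_left num : Int) + 1 else -1) := by
  rw [find_higher_number, find_higher_go_eq num price_range (by decide) 0, bisect_left_eq]
  split_ifs <;> omega

-- the positions lie in posSet
theorem pos_form_mem (c : Nat) (hc : c ≤ 15) :
    (if ((c : Int)) < (price_range.length : Int) then (c : Int) + 1 else -1) ∈ posSet := by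
  have : (price_range.length : Int) = 15 := by simp [price_range]
  rw [this]
  simp only [posSet, List.mem_cons, List.not_mem_nil, or_false]
  split_ifs <;> omega

theorem low_pos_mem (num : Int) : find_lower_number price_range num ∈ posSet := by
  rw [low_pos_eq]
  exact pos_form_mem _ (by rw [bisect_right_eq]; simpa [price_range] using List.countP_le_length (l := price_range) (p := fun a => decide (a ≤ num)))

theorem high_pos_mem (num : Int) : find_higher_number price_range num ∈ posSet := by
  rw [high_pos_eq]
  exact pos_form_mem _ (by rw [bisect_left_eq]; simpa [price_range] using List.countP_le_length (l := price_range) (p := fun a => decide (a < num)))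

-- the two string builders agree on all positions either side can produce
set_option maxHeartbeats 2000000 in
theorem build_eq : ∀ l ∈ posSet, ∀ h ∈ posSet, build_url_a l h = build_url_b l h := by decide

-- ===== VERDICT (by name: the statement is the Claim_ definition above) =====
theorem set_price_range_url_option_spec : Claim_equal_set_price_range_url_option := by
  intro low_price high_price _
  unfold Spec_set_price_range_url_option set_price_range_url_option set_price_range_url_option_alt
  by_cases h0 : low_price = 0 ∧ high_price = 0
  · simp [h0]
  · simp only [if_neg h0]
    rw [← low_pos_eq, ← high_pos_eq]
    refine build_eq _ ?_ _ ?_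
    · split_ifs
      · exact low_pos_mem _
      · decide
    · split_ifs
      · exact high_pos_mem _
      · decide
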